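-- pv_equiv track=rewrite | github.com/sushilpoddar/Sorting-And-Searching-Visualisation-In-Python-Using-Tkinter | quickSort.py | getColorArray
-- ===== SOURCE A (Python) =====
-- def getColorArray(dataLen, head, tail, border, currIdx, isSwaping=False):
-- 	colorArray = []
-- 	for i in range(dataLen):
-- 		if head <= i <= tail:
-- 			colorArray.append('gray')
-- 		else:
-- 			colorArray.append('white')
--
-- 		if i == tail:
-- 			colorArray[i] = 'blue'
-- 		elif i == border:
-- 			colorArray[i] = 'red'
-- 		elif i == currIdx:
-- 			colorArray[i] = 'yellow'
--
-- 		if isSwaping: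
-- 			if i == border or i == currIdx:
-- 				colorArray[i] = 'green'
--
-- 	return colorArray
-- ===== SOURCE B (Python) =====
-- def getColorArray(dataLen, head, tail, border, currIdx, isSwaping=False):
--     # base: three uniform runs computed arithmetically (no per-index conditions)
--     lo = min(max(head, 0), dataLen)
--     hi = min(max(tail + 1, lo), dataLen)
--     colors = ['white'] * lo + ['gray'] * (hi - lo) + ['white'] * (dataLen - hi)
--
--     def finalColor(i):
--         if isSwaping and (i == border or i == currIdx):
--             return 'green'
--         if i == tail:
--             return 'blue'
--         if i == border:
--             return 'red'
--         if i == currIdx: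
--             return 'yellow'
--         return 'gray' if head <= i <= tail else 'white'
--
--     # at most three cells can differ from the base; write each one's final color
--     for idx in (tail, border, currIdx):
--         if 0 <= idx < dataLen:
--             colors[idx] = finalColor(idx)
--     return colors
-- ===== Notes on version B (the rewrite author's own statement) =====
-- stated objective: alternative
-- what changed: Instead of A's per-index loop with an elif override chain at every position, B builds the base by arithmetic run-length construction (three uniform 'white'/'gray'/'gray-boundary' runs via list repetition from clamped bounds) and then writes the final color only at the at-most-three special positions tail/border/currIdx, each resolved pointwise.
import Mathlib
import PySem

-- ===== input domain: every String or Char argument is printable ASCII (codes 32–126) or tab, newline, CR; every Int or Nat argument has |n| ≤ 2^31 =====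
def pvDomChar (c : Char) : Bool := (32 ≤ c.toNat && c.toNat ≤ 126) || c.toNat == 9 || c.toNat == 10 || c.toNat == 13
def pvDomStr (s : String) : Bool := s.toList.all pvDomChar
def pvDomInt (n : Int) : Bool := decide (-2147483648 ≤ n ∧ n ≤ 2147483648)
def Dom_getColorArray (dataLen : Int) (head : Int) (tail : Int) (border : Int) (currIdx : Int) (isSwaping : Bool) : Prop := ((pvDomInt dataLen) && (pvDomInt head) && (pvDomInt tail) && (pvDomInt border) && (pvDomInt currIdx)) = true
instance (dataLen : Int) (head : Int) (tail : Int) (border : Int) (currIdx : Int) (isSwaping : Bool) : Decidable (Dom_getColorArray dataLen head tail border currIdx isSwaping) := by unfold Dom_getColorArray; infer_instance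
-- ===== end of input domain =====

-- B replaces A's per-index loop (with its elif override chain at every position) by an
-- arithmetic run-length construction of the base plus at most three pointwise-resolved
-- writes at the special positions (objective: alternative decomposition, same cost).

-- ===== PORT A =====
-- per-index loop: append base color, then the elif override chain writes colorArray[i], then green-if-swapping
def getColorArray (dataLen : Int) (head : Int) (tail : Int) (border : Int) (currIdx : Int) (isSwaping : Bool) : List String :=
  (PySem.List.pyRange 0 dataLen 1).foldl
    (fun colorArray i =>
      let colorArray := colorArray ++ [if head ≤ i ∧ i ≤ tail then "gray" else "white"]
      let colorArray :=
        if i = tail then PySem.List.pySetD colorArray i "blue"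
        else if i = border then PySem.List.pySetD colorArray i "red"
        else if i = currIdx then PySem.List.pySetD colorArray i "yellow"
        else colorArray
      if isSwaping then
        if i = border ∨ i = currIdx then PySem.List.pySetD colorArray i "green" else colorArray
      else colorArray)
    []

-- ===== PORT B =====
-- finalColor(i): the fully resolved color of a special cell (B's nested helper)
def altFinalColor (head : Int) (tail : Int) (border : Int) (currIdx : Int) (isSwaping : Bool) (i : Int) : String :=
  if isSwaping ∧ (i = border ∨ i = currIdx) then "green"
  else if i = tail then "blue"
  else if i = border then "red"
  else if i = currIdx then "yellow"
  else if head ≤ i ∧ i ≤ tail then "gray" else "white"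

def getColorArray_alt (dataLen : Int) (head : Int) (tail : Int) (border : Int) (currIdx : Int) (isSwaping : Bool) : List String :=
  let lo := min (max head 0) dataLen
  let hi := min (max (tail + 1) lo) dataLen
  let colors := List.replicate lo.toNat "white" ++ List.replicate (hi - lo).toNat "gray"
                  ++ List.replicate (dataLen - hi).toNat "white"
  [tail, border, currIdx].foldl
    (fun colors idx =>
      if 0 ≤ idx ∧ idx < dataLen then
        PySem.List.pySetD colors idx (altFinalColor head tail border currIdx isSwaping idx)
      else colors)
    colors

-- ===== PRECONDITION & SPEC =====
def Spec_getColorArray (dataLen : Int) (head : Int) (tail : Int) (border : Int) (currIdx : Int) (isSwaping : Bool) (out : List String) : Prop := out = getColorArray_alt dataLen head tail border currIdx isSwaping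
instance (dataLen : Int) (head : Int) (tail : Int) (border : Int) (currIdx : Int) (isSwaping : Bool) (out : List String) : Decidable (Spec_getColorArray dataLen head tail border currIdx isSwaping out) := by unfold Spec_getColorArray; infer_instance

-- ===== CLAIM (what is proved, stated in full; the proofs are below) =====
def Claim_equal_getColorArray : Prop := ∀ (dataLen : Int) (head : Int) (tail : Int) (border : Int) (currIdx : Int) (isSwaping : Bool), Dom_getColorArray dataLen head tail border currIdx isSwaping → Spec_getColorArray dataLen head tail border currIdx isSwaping (getColorArray dataLen head tail border currIdx isSwaping)

-- ===== LEMMAS AND PROOFS =====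

theorem set_append_last {α : Type} (xs : List α) (a v : α) :
    (xs ++ [a]).set xs.length v = xs ++ [v] := by
  induction xs with
  | nil => rfl
  | cons x xs ih => simp [ih]

-- a guarded write of F idx at idx on the base map is a pointwise update of the mapped function
theorem write_map_pyRange (dataLen idx : Int) (F g : Int → String) :
    (if 0 ≤ idx ∧ idx < dataLen then
        PySem.List.pySetD ((PySem.List.pyRange 0 dataLen 1).map g) idx (F idx)
      else (PySem.List.pyRange 0 dataLen 1).map g)
      = (PySem.List.pyRange 0 dataLen 1).map (fun i => if i = idx then F i else g i) := by
  split_ifs with h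
  · rw [PySem.List.pySetD_of_nonneg _ _ h.1]
    apply List.ext_getElem
    · simp
    · intro k hk1 hk2
      rw [List.getElem_set]
      simp only [List.getElem_map, PySem.List.getElem_pyRange_one]
      have hlen : ((PySem.List.pyRange 0 dataLen 1).map g).length = dataLen.toNat := by
        simp [PySem.List.length_pyRange_one]
      split_ifs with h1 h2 h2
      · rw [h2]
      · exfalso; apply h2; omega
      · exfalso; apply h1; omega
      · rfl
  · apply List.map_congr_left
    intro i hi
    rw [PySem.List.mem_pyRange_one] at hi
    have : i ≠ idx := by omega
    simp [this]

-- folding guarded writes over a list of special positions updates the mapped function on membership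
theorem foldl_write_map_pyRange (dataLen : Int) (F : Int → String) (L : List Int) (g : Int → String) :
    L.foldl
      (fun colors idx =>
        if 0 ≤ idx ∧ idx < dataLen then PySem.List.pySetD colors idx (F idx) else colors)
      ((PySem.List.pyRange 0 dataLen 1).map g)
      = (PySem.List.pyRange 0 dataLen 1).map (fun i => if i ∈ L then F i else g i) := by
  induction L generalizing g with
  | nil => simp
  | cons x L ih =>
    simp only [List.foldl_cons]
    rw [write_map_pyRange dataLen x F g, ih]
    apply List.map_congr_left
    intro i _
    by_cases h1 : i ∈ L <;> by_cases h2 : i = x <;> simp [h1, h2]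

-- a range segment on which f is constant maps to a replicate run
theorem map_const_seg (a b : Int) (c : String) (f : Int → String)
    (h : ∀ i, a ≤ i → i < b → f i = c) :
    (PySem.List.pyRange a b 1).map f = List.replicate (b - a).toNat c := by
  rw [show (PySem.List.pyRange a b 1).map f = (PySem.List.pyRange a b 1).map (fun _ => c) from
      List.map_congr_left (fun i hi => by
        rw [PySem.List.mem_pyRange_one] at hi; exact h i hi.1 hi.2)]
  rw [List.map_const', PySem.List.length_pyRange_one]

-- B's run-length base equals the pointwise gray/white base over the range
theorem base_eq (dataLen head tail : Int) :
    List.replicate (min (max head 0) dataLen).toNat "white"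
      ++ List.replicate ((min (max (tail + 1) (min (max head 0) dataLen)) dataLen
            - min (max head 0) dataLen)).toNat "gray"
      ++ List.replicate (dataLen - min (max (tail + 1) (min (max head 0) dataLen)) dataLen).toNat "white"
    = (PySem.List.pyRange 0 dataLen 1).map
        (fun i => if head ≤ i ∧ i ≤ tail then "gray" else "white") := by
  set lo := min (max head 0) dataLen with hlo
  set hi := min (max (tail + 1) lo) dataLen with hhi
  by_cases hd : dataLen ≤ 0
  · have h1 : lo = dataLen := by omega
    have h2 : hi = dataLen := by omega
    rw [PySem.List.pyRange_one_eq_nil (by omega)]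
    simp [h1, h2, Int.toNat_of_nonpos hd]
  · have h0 : (0:Int) ≤ lo ∧ lo ≤ hi ∧ hi ≤ dataLen := by omega
    rw [PySem.List.pyRange_one_append 0 lo dataLen h0.1 (by omega),
        PySem.List.pyRange_one_append lo hi dataLen h0.2.1 h0.2.2]
    simp only [List.map_append]
    rw [map_const_seg 0 lo "white" _ (fun i h1 h2 => by
          have : ¬ (head ≤ i ∧ i ≤ tail) := by omega
          simp [this]),
        map_const_seg lo hi "gray" _ (fun i h1 h2 => by
          have : head ≤ i ∧ i ≤ tail := by omega
          simp [this]),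
        map_const_seg hi dataLen "white" _ (fun i h1 h2 => by
          have : ¬ (head ≤ i ∧ i ≤ tail) := by omega
          simp [this])]
    simp

theorem alt_eq_map (dataLen head tail border currIdx : Int) (isSwaping : Bool) :
    getColorArray_alt dataLen head tail border currIdx isSwaping
      = (PySem.List.pyRange 0 dataLen 1).map (altFinalColor head tail border currIdx isSwaping) := by
  unfold getColorArray_alt
  simp only []
  rw [base_eq dataLen head tail,
      foldl_write_map_pyRange dataLen (altFinalColor head tail border currIdx isSwaping)]
  apply List.map_congr_left
  intro i _
  by_cases h : i ∈ [tail, border, currIdx]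
  · simp [h]
  · simp only [List.mem_cons, not_or] at h
    obtain ⟨h1, h2, h3⟩ := h
    simp [List.mem_cons, h1, h2, h3, altFinalColor]

theorem a_eq_map (dataLen head tail border currIdx : Int) (isSwaping : Bool) :
    getColorArray dataLen head tail border currIdx isSwaping
      = (PySem.List.pyRange 0 dataLen 1).map (altFinalColor head tail border currIdx isSwaping) := by
  unfold getColorArray
  rw [PySem.List.pyRange_one]
  simp only [Int.sub_zero]
  generalize dataLen.toNat = n
  induction n with
  | zero => simp
  | succ m ih =>
    rw [List.range_succ]
    simp only [List.map_append, List.map_cons, List.map_nil, List.foldl_append,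
      List.foldl_cons, List.foldl_nil]
    rw [ih]
    set i : Int := 0 + (m : Int) with hi
    have hlen : (List.map (altFinalColor head tail border currIdx isSwaping)
        (List.map (fun k : Nat => 0 + (k : Int)) (List.range m))).length = m := by simp
    generalize hg : List.map (altFinalColor head tail border currIdx isSwaping)
        (List.map (fun k : Nat => 0 + (k : Int)) (List.range m)) = xs at hlen ⊢
    clear ih hg
    have hset : ∀ (a v : String), PySem.List.pySetD (xs ++ [a]) i v = xs ++ [v] := by
      intro a v
      rw [PySem.List.pySetD_of_nonneg _ _ (by omega : (0:Int) ≤ i)]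
      have hL : i.toNat = xs.length := by omega
      rw [hL, set_append_last]
    have hmid : ∀ a : String,
        (if i = tail then PySem.List.pySetD (xs ++ [a]) i "blue"
         else if i = border then PySem.List.pySetD (xs ++ [a]) i "red"
         else if i = currIdx then PySem.List.pySetD (xs ++ [a]) i "yellow"
         else xs ++ [a])
        = xs ++ [if i = tail then "blue" else if i = border then "red"
                 else if i = currIdx then "yellow" else a] := by
      intro a; split_ifs <;> simp [hset]
    rw [hmid]
    have hfin : ∀ a : String,
        (if isSwaping = true then
            if i = border ∨ i = currIdx then PySem.List.pySetD (xs ++ [a]) i "green" else xs ++ [a]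
          else xs ++ [a])
        = xs ++ [if isSwaping ∧ (i = border ∨ i = currIdx) then "green" else a] := by
      intro a; split_ifs <;> simp_all
    rw [hfin]
    congr 1

-- ===== VERDICT (by name: the statement is the Claim_ definition above) =====
theorem getColorArray_spec : Claim_equal_getColorArray := by
  intro dataLen head tail border currIdx isSwaping _
  unfold Spec_getColorArray
  rw [a_eq_map, alt_eq_map]
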